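-- pv_equiv track=rewrite | github.com/matheusaraujo/advent-of-code | 2015/day11/helpers.py | contains_at_least_two_non_overlapping_pairs
-- ===== SOURCE A (Python) =====
-- def contains_at_least_two_non_overlapping_pairs(password: str) -> bool:
--     pairs, i = set(), 0
--     while i < len(password) - 1:
--         if password[i] == password[i + 1]:
--             pairs.add(password[i])
--             i += 2
--         else:
--             i += 1
--     return len(pairs) >= 2
-- ===== SOURCE B (Python) =====
-- def contains_at_least_two_non_overlapping_pairs(password: str) -> bool:
--     return len({a for a, b in zip(password, password[1:]) if a == b}) >= 2
-- ===== Notes on version B (the rewrite author's own statement) =====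
-- stated objective: simpler
-- what changed: Replaces the greedy while-loop with conditional i+=2/i+=1 index jumps by a single set comprehension over all adjacent pairs (zip of the string with its shift); correct because overlapping adjacent pairs necessarily share the same character, so skipping never changes the set of pair characters.
import Mathlib
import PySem

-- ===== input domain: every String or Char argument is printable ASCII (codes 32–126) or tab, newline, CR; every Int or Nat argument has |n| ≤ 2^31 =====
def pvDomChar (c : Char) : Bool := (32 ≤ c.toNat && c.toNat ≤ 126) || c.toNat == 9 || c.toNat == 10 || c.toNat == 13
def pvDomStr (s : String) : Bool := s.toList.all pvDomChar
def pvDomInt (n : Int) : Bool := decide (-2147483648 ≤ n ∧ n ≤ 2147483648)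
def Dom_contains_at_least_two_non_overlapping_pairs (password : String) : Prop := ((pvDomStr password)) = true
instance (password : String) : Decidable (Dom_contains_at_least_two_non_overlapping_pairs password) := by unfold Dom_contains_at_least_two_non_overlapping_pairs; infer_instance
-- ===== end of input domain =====

-- B replaces A's greedy while-loop (conditional i += 2 / i += 1) by one set
-- comprehension over all adjacent pairs; same return value, proved below.

-- ===== PORT A =====
-- the while-loop: looks at positions i, i+1; on a match adds the char and jumps 2, else 1
def pvLoopA : List Char → PySem.Set Char → PySem.Set Char
  | c1 :: c2 :: rest, s =>
      if c1 = c2 then pvLoopA rest (PySem.Set.add s c1) else pvLoopA (c2 :: rest) s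
  | _, s => s

def contains_at_least_two_non_overlapping_pairs (password : String) : Bool :=
  decide (2 ≤ (pvLoopA password.toList PySem.Set.empty).length)

-- ===== PORT B =====
-- {a for a, b in zip(password, password[1:]) if a == b}, then len(...) >= 2
def contains_at_least_two_non_overlapping_pairs_alt (password : String) : Bool :=
  let l := password.toList
  let dups := ((l.zip (l.drop 1)).filter (fun ab => ab.1 == ab.2)).map Prod.fst
  decide (2 ≤ (PySem.Set.ofList dups).length)

-- ===== PRECONDITION & SPEC =====
def Spec_contains_at_least_two_non_overlapping_pairs (password : String) (out : Bool) : Prop := out = contains_at_least_two_non_overlapping_pairs_alt password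
instance (password : String) (out : Bool) : Decidable (Spec_contains_at_least_two_non_overlapping_pairs password out) := by unfold Spec_contains_at_least_two_non_overlapping_pairs; infer_instance

-- ===== CLAIM (what is proved, stated in full; the proofs are below) =====
def Claim_equal_contains_at_least_two_non_overlapping_pairs : Prop := ∀ (password : String), Dom_contains_at_least_two_non_overlapping_pairs password → Spec_contains_at_least_two_non_overlapping_pairs password (contains_at_least_two_non_overlapping_pairs password)

-- ===== LEMMAS AND PROOFS =====

-- B's list of duplicate-pair characters
def pvDup (l : List Char) : List Char :=
  ((l.zip (l.drop 1)).filter (fun ab => ab.1 == ab.2)).map Prod.fst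

theorem pvDup_cons (b : Char) (r : List Char) :
    pvDup (b :: r) = if r.head? = some b then b :: pvDup r else pvDup r := by
  cases r with
  | nil => simp [pvDup]
  | cons h t =>
      by_cases hb : b = h
      · simp [pvDup, hb]
      · have hb' : ¬h = b := fun h' => hb h'.symm
        simp [pvDup, hb, hb']

theorem pvLoopA_nodup : ∀ (l : List Char) (s : PySem.Set Char), s.Nodup → (pvLoopA l s).Nodup := by
  intro l s
  induction l, s using pvLoopA.induct with
  | case1 c2 rest s ih =>
      intro hs
      simpa [pvLoopA] using ih (PySem.Set.nodup_add s c2 hs)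
  | case2 c1 c2 rest s hne ih =>
      intro hs
      simpa [pvLoopA, hne] using ih hs
  | case3 t s h =>
      intro hs
      cases t with
      | nil => simpa [pvLoopA] using hs
      | cons c t' =>
          cases t' with
          | nil => simpa [pvLoopA] using hs
          | cons c2 r => exact absurd rfl (h c c2 r)

theorem mem_pvLoopA : ∀ (l : List Char) (s : PySem.Set Char) (x : Char),
    x ∈ pvLoopA l s ↔ x ∈ s ∨ x ∈ pvDup l := by
  intro l s x
  induction l, s using pvLoopA.induct with
  | case1 c1 rest s ih =>
      rw [show pvLoopA (c1 :: c1 :: rest) s = pvLoopA rest (PySem.Set.add s c1) from by simp [pvLoopA]]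
      rw [ih, PySem.Set.mem_add]
      rw [show pvDup (c1 :: c1 :: rest) = c1 :: pvDup (c1 :: rest) from by simp [pvDup_cons]]
      rw [pvDup_cons c1 rest]
      split_ifs <;> simp <;> tauto
  | case2 c1 c2 rest s hne ih =>
      rw [show pvLoopA (c1 :: c2 :: rest) s = pvLoopA (c2 :: rest) s from by simp [pvLoopA, hne]]
      rw [ih]
      have hne' : ¬c2 = c1 := fun h' => hne h'.symm
      rw [show pvDup (c1 :: c2 :: rest) = pvDup (c2 :: rest) from by
        simp [pvDup_cons c1 (c2 :: rest), hne']]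
  | case3 t s h =>
      cases t with
      | nil => simp [pvLoopA, pvDup]
      | cons c t' =>
          cases t' with
          | nil => simp [pvLoopA, pvDup]
          | cons c2 r => exact absurd rfl (h c c2 r)

theorem pvLoopA_perm (l : List Char) :
    (pvLoopA l PySem.Set.empty).Perm (PySem.Set.ofList (pvDup l)) := by
  rw [List.perm_ext_iff_of_nodup (pvLoopA_nodup l PySem.Set.empty (by simp [PySem.Set.empty]))
        (PySem.Set.nodup_ofList (pvDup l))]
  intro a
  rw [mem_pvLoopA, PySem.Set.mem_ofList]
  simp [PySem.Set.empty]

-- ===== VERDICT (by name: the statement is the Claim_ definition above) =====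
theorem contains_at_least_two_non_overlapping_pairs_spec : Claim_equal_contains_at_least_two_non_overlapping_pairs := by
  intro password _
  unfold Spec_contains_at_least_two_non_overlapping_pairs
  unfold contains_at_least_two_non_overlapping_pairs contains_at_least_two_non_overlapping_pairs_alt
  rw [(pvLoopA_perm password.toList).length_eq]
  rfl
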